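-- pv_equiv track=rewrite | github.com/whynotlol1/python-maze-game | game/map_generation.py | automata_iteration
-- ===== SOURCE A (Python) =====
-- def automata_iteration(grid, min_count, make_pillars):
--     new_grid = [row[:] for row in grid]
--     for i___ in range(1, len(grid) - 1):
--         for j in range(1, len(grid[0]) - 1):
--             count = 0
--             for k in range(-1, 2):
--                 for l in range(-1, 2):
--                     if grid[i___ + k][j + l] == 1:
--                         count += 1
--             if count >= min_count or (count == 0 and make_pillars == 1):
--                 new_grid[i___][j] = 1
--             else:
--                 new_grid[i___][j] = 0
--     return new_grid
-- ===== SOURCE B (Python) =====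
-- def automata_iteration(grid, min_count, make_pillars):
--     rows = len(grid)
--     if rows < 3:
--         return [row[:] for row in grid]
--     cols = len(grid[0])
--     if cols < 3:
--         return [row[:] for row in grid]
--     # horizontal triple sums of the ==1 indicator (separable 3x3 filter: 9 cell tests -> 3 adds per cell)
--     hs = [[(row[c - 1] == 1) + (row[c] == 1) + (row[c + 1] == 1)
--            for c in range(1, cols - 1)] for row in grid]
--     def new_row(i, row):
--         if i == 0 or i == rows - 1:
--             return row[:]
--         mid = []
--         for j in range(cols - 2):
--             cnt = hs[i - 1][j] + hs[i][j] + hs[i + 1][j]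
--             mid.append(1 if cnt >= min_count or (cnt == 0 and make_pillars == 1) else 0)
--         return [row[0]] + mid + row[cols - 1:]
--     return [new_row(i, row) for i, row in enumerate(grid)]
-- ===== Notes on version B (the rewrite author's own statement) =====
-- stated objective: faster
-- what changed: A rescans the 3x3 neighbourhood (9 indexed tests) per cell while mutating a copied grid in place; B precomputes one table of horizontal triple sums of the ==1 indicator (separable filter) so each cell needs only 3 additions, and assembles the new grid functionally from row slices.
import Mathlib
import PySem

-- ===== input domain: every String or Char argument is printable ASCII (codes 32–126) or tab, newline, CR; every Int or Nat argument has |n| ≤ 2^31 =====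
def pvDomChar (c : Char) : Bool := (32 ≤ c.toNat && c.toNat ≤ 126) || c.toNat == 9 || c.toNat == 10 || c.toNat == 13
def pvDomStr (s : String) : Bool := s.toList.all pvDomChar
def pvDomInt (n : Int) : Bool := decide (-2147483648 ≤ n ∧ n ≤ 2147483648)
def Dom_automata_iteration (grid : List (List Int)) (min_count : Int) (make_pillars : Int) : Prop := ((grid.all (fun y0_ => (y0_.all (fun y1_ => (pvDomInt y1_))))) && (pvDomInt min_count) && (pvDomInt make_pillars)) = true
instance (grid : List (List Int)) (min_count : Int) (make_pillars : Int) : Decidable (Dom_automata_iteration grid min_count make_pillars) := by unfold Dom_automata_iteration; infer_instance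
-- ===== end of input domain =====

-- B replaces A's per-cell 3x3 rescan with in-place updates by one precomputed table of horizontal
-- triple sums of the ==1 indicator (separable filter), assembling the new grid functionally.

-- ===== PORT A =====
-- the two innermost loops of A (the 3x3 neighbour count), verbatim
def automata_count (grid : List (List Int)) (i j : Int) : Int :=
  (PySem.List.pyRange (-1) 2 1).foldl (fun c k =>
    (PySem.List.pyRange (-1) 2 1).foldl (fun c l =>
      if PySem.List.pyGetD (PySem.List.pyGetD grid (i + k) []) (j + l) 0 = 1 then c + 1 else c) c) 0

def automata_iteration (grid : List (List Int)) (min_count : Int) (make_pillars : Int) : List (List Int) :=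
  let new_grid := grid.map (fun row => row)
  (PySem.List.pyRange 1 ((grid.length : Int) - 1) 1).foldl (fun ng i =>
    (PySem.List.pyRange 1 (((grid.headD []).length : Int) - 1) 1).foldl (fun ng j =>
      let count := automata_count grid i j
      if min_count ≤ count ∨ (count = 0 ∧ make_pillars = 1) then
        PySem.List.pySetD ng i (PySem.List.pySetD (PySem.List.pyGetD ng i []) j 1)
      else
        PySem.List.pySetD ng i (PySem.List.pySetD (PySem.List.pyGetD ng i []) j 0)) ng) new_grid

-- ===== PORT B =====
def automata_iteration_alt (grid : List (List Int)) (min_count : Int) (make_pillars : Int) : List (List Int) :=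
  let rows := grid.length
  if rows < 3 then grid.map (fun row => row) else
  let cols := (grid.headD []).length
  if cols < 3 then grid.map (fun row => row) else
  let hs := grid.map (fun row =>
    (PySem.List.pyRange 1 ((cols : Int) - 1) 1).map (fun c =>
      (if PySem.List.pyGetD row (c - 1) 0 = 1 then (1 : Int) else 0)
      + (if PySem.List.pyGetD row c 0 = 1 then 1 else 0)
      + (if PySem.List.pyGetD row (c + 1) 0 = 1 then 1 else 0)))
  let newRow : Int → List Int → List Int := fun i row =>
    if i = 0 ∨ i = (rows : Int) - 1 then row
    else
      let mid := (PySem.List.pyRange 0 ((cols : Int) - 2) 1).map (fun j =>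
        let cnt := PySem.List.pyGetD (PySem.List.pyGetD hs (i - 1) []) j 0
                 + PySem.List.pyGetD (PySem.List.pyGetD hs i []) j 0
                 + PySem.List.pyGetD (PySem.List.pyGetD hs (i + 1) []) j 0
        if min_count ≤ cnt ∨ (cnt = 0 ∧ make_pillars = 1) then (1 : Int) else 0)
      [PySem.List.pyGetD row 0 0] ++ mid ++ PySem.List.slice row (some ((cols : Int) - 1)) none
  (PySem.List.enumerate grid 0).map (fun p => newRow p.1 p.2)

-- ===== PRECONDITION & SPEC =====
-- Pre_ excludes exactly the ragged grids on which A raises IndexError (≥3 rows, first row of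
-- length ≥ 3, some row shorter than the first row); A returns on every input satisfying Pre_.
def Pre_automata_iteration (grid : List (List Int)) (min_count : Int) (make_pillars : Int) : Prop :=
  grid.length < 3 ∨ (grid.headD []).length < 3 ∨ ∀ row ∈ grid, (grid.headD []).length ≤ row.length
instance (grid : List (List Int)) (min_count : Int) (make_pillars : Int) : Decidable (Pre_automata_iteration grid min_count make_pillars) := by unfold Pre_automata_iteration; infer_instance

def pvWitness_automata_iteration : List (List Int) × Int × Int := ([[1,1,1],[1,0,1],[1,1,1]], 5, 0)

def Spec_automata_iteration (grid : List (List Int)) (min_count : Int) (make_pillars : Int) (out : List (List Int)) : Prop := out = automata_iteration_alt grid min_count make_pillars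
instance (grid : List (List Int)) (min_count : Int) (make_pillars : Int) (out : List (List Int)) : Decidable (Spec_automata_iteration grid min_count make_pillars out) := by unfold Spec_automata_iteration; infer_instance

-- ===== CLAIM (what is proved, stated in full; the proofs are below) =====
def Claim_equal_automata_iteration : Prop := ∀ (grid : List (List Int)) (min_count : Int) (make_pillars : Int), Dom_automata_iteration grid min_count make_pillars → Pre_automata_iteration grid min_count make_pillars → Spec_automata_iteration grid min_count make_pillars (automata_iteration grid min_count make_pillars)

-- ===== LEMMAS AND PROOFS =====

lemma mapIdx_ident {α : Type} (xs : List α) : List.mapIdx (fun _ x => x) xs = xs := by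
  apply List.ext_getElem
  · simp
  · intro n h1 h2; simp

lemma foldl_set_mapIdx {α : Type} (js : List Int) (g : Int → α → α) (d : α) :
    ∀ (xs : List α), js.Nodup → (∀ j ∈ js, 0 ≤ j) →
    js.foldl (fun r j => PySem.List.pySetD r j (g j (PySem.List.pyGetD r j d))) xs
      = xs.mapIdx (fun n x => if (n : Int) ∈ js then g (n : Int) x else x) := by
  induction js with
  | nil =>
    intro xs _ _
    simpa using (mapIdx_ident xs).symm
  | cons j js ih =>
    intro xs hnd hpos
    have hj0 : 0 ≤ j := hpos j (by simp)
    simp only [List.foldl_cons]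
    rw [ih _ hnd.of_cons (fun x hx => hpos x (List.mem_cons_of_mem _ hx))]
    rw [PySem.List.pySetD_of_nonneg xs _ hj0]
    apply List.ext_getElem
    · simp
    · intro n h1 h2
      have hxl : n < xs.length := by simpa using h2
      have hsl : n < (xs.set j.toNat (g j (PySem.List.pyGetD xs j d))).length := by
        simpa using hxl
      rw [List.getElem_mapIdx, List.getElem_mapIdx]
      by_cases hn : (n : Int) = j
      · have hjn : j.toNat = n := by omega
        have hnin : (n : Int) ∉ js := by rw [hn]; exact (List.nodup_cons.mp hnd).1
        have hjl : j.toNat < xs.length := by omega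
        have hv : (xs.set j.toNat (g j (PySem.List.pyGetD xs j d)))[n]'hsl
            = g j (PySem.List.pyGetD xs j d) := by
          subst hjn; exact List.getElem_set_self _
        rw [if_neg hnin, hv, if_pos (by rw [hn]; exact List.mem_cons_self ..)]
        rw [hn, PySem.List.pyGetD_eq_getElem xs d hj0 (by omega)]
        simp only [hjn]
      · have hset : (xs.set j.toNat (g j (PySem.List.pyGetD xs j d)))[n]'hsl = xs[n]'hxl := by
          rcases Nat.lt_or_ge j.toNat xs.length with hl | hl
          · exact List.getElem_set_ne (l := xs) (i := j.toNat) (j := n)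
              (a := g j (PySem.List.pyGetD xs j d)) (by omega) (by simpa using hxl)
          · simp only [List.set_eq_of_length_le hl]
        rw [hset]
        have hmem : ((n:Int) ∈ j :: js) ↔ ((n:Int) ∈ js) := by simp [hn]
        simp only [hmem]

lemma foldl_modify_at {α : Type} (i : Int) (hi : 0 ≤ i) (f : Int → List α → List α) (d : List α) :
    ∀ (js : List Int) (ng : List (List α)),
    js.foldl (fun ng j => PySem.List.pySetD ng i (f j (PySem.List.pyGetD ng i d))) ng
      = PySem.List.pySetD ng i (js.foldl (fun r j => f j r) (PySem.List.pyGetD ng i d)) := by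
  intro js
  induction js with
  | nil =>
    intro ng
    simp only [List.foldl_nil]
    rw [PySem.List.pySetD_of_nonneg ng _ hi]
    by_cases hl : i.toNat < ng.length
    · rw [PySem.List.pyGetD_eq_getElem ng d hi (by omega)]
      exact (List.set_getElem_self _).symm
    · rw [List.set_eq_of_length_le (by omega)]
  | cons j js ih =>
    intro ng
    simp only [List.foldl_cons]
    rw [ih]
    by_cases hl : i.toNat < ng.length
    · have hget : PySem.List.pyGetD (PySem.List.pySetD ng i (f j (PySem.List.pyGetD ng i d))) i d
          = f j (PySem.List.pyGetD ng i d) := by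
        rw [PySem.List.pySetD_of_nonneg ng _ hi,
            PySem.List.pyGetD_eq_getElem _ d hi (by simp; omega)]
        exact List.getElem_set_self _
      rw [hget]
      rw [PySem.List.pySetD_of_nonneg ng _ hi, PySem.List.pySetD_of_nonneg _ _ hi,
          PySem.List.pySetD_of_nonneg ng _ hi, List.set_set]
    · have hnop : ∀ v, PySem.List.pySetD ng i v = ng := by
        intro v; rw [PySem.List.pySetD_of_nonneg ng _ hi, List.set_eq_of_length_le (by omega)]
      simp only [hnop]

-- the value A writes into an interior cell
def valA (grid : List (List Int)) (mc mp i j : Int) : Int :=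
  if mc ≤ automata_count grid i j ∨ (automata_count grid i j = 0 ∧ mp = 1) then 1 else 0

lemma A_char (grid : List (List Int)) (mc mp : Int) :
    automata_iteration grid mc mp
      = grid.mapIdx (fun n row =>
          if (n : Int) ∈ PySem.List.pyRange 1 ((grid.length : Int) - 1) 1 then
            row.mapIdx (fun c x =>
              if (c : Int) ∈ PySem.List.pyRange 1 (((grid.headD []).length : Int) - 1) 1 then
                valA grid mc mp (n : Int) (c : Int) else x)
          else row) := by
  unfold automata_iteration
  simp only [List.map_id']
  rw [PySem.List.foldl_congr_mem _ _
      (fun ng i => PySem.List.pySetD ng i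
        ((PySem.List.pyRange 1 (((grid.headD []).length : Int) - 1) 1).foldl
          (fun r j => PySem.List.pySetD r j (valA grid mc mp i j)) (PySem.List.pyGetD ng i []))) _
      (by
        intro ng i hi
        have hi0 : (0 : Int) ≤ i := by
          have := (PySem.List.mem_pyRange_one.mp hi).1; omega
        rw [PySem.List.foldl_congr_mem _ _
            (fun ng j => PySem.List.pySetD ng i
              ((fun j r => PySem.List.pySetD r j (valA grid mc mp i j)) j
                (PySem.List.pyGetD ng i []))) _
            (by
              intro ng' j _
              simp only [valA]
              by_cases h : mc ≤ automata_count grid i j ∨ (automata_count grid i j = 0 ∧ mp = 1)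
              · rw [if_pos h, if_pos h]
              · rw [if_neg h, if_neg h])]
        dsimp only
        exact foldl_modify_at i hi0
          (fun j r => PySem.List.pySetD r j (valA grid mc mp i j)) [] _ ng)]
  rw [foldl_set_mapIdx _
      (fun i r => (PySem.List.pyRange 1 (((grid.headD []).length : Int) - 1) 1).foldl
        (fun r j => PySem.List.pySetD r j (valA grid mc mp i j)) r) [] grid
      (PySem.List.nodup_pyRange_one _ _)
      (fun j hj => by have := (PySem.List.mem_pyRange_one.mp hj).1; omega)]
  apply List.ext_getElem
  · simp
  · intro n h1 h2
    rw [List.getElem_mapIdx, List.getElem_mapIdx]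
    by_cases hmem : (n : Int) ∈ PySem.List.pyRange 1 ((grid.length : Int) - 1) 1
    · rw [if_pos hmem, if_pos hmem]
      rw [foldl_set_mapIdx _ (fun j _ => valA grid mc mp (n : Int) j) 0 _
          (PySem.List.nodup_pyRange_one _ _)
          (fun j hj => by have := (PySem.List.mem_pyRange_one.mp hj).1; omega)]
    · rw [if_neg hmem, if_neg hmem]

lemma enum_map {α β : Type} (g : Int × α → β) (xs : List α) (s : Int) :
    (PySem.List.enumerate xs s).map g = xs.mapIdx (fun n x => g (s + (n : Int), x)) := by
  apply List.ext_getElem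
  · simp
  · intro n h1 h2
    simp [PySem.List.getElem_enumerate]

lemma ite_incr (P : Prop) [Decidable P] (x : Int) :
    (if P then x + 1 else x) = x + (if P then 1 else 0) := by
  split <;> simp

-- the 3x3 count equals the sum of the three horizontal triple sums
lemma count_eq_triples (grid : List (List Int)) (n c : Nat)
    (hn1 : 1 ≤ n) (hn2 : n + 1 < grid.length)
    (hc1 : 1 ≤ c) (hc2 : c + 1 < (grid.headD []).length) :
    automata_count grid (n : Int) (c : Int)
      = ((if PySem.List.pyGetD (grid[n-1]'(by omega)) ((c : Int) + -1) 0 = 1 then (1:Int) else 0)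
          + (if PySem.List.pyGetD (grid[n-1]'(by omega)) ((c : Int) + 0) 0 = 1 then 1 else 0)
          + (if PySem.List.pyGetD (grid[n-1]'(by omega)) ((c : Int) + 1) 0 = 1 then 1 else 0))
        + ((if PySem.List.pyGetD (grid[n]'(by omega)) ((c : Int) + -1) 0 = 1 then (1:Int) else 0)
          + (if PySem.List.pyGetD (grid[n]'(by omega)) ((c : Int) + 0) 0 = 1 then 1 else 0)
          + (if PySem.List.pyGetD (grid[n]'(by omega)) ((c : Int) + 1) 0 = 1 then 1 else 0))
        + ((if PySem.List.pyGetD (grid[n+1]'(by omega)) ((c : Int) + -1) 0 = 1 then (1:Int) else 0)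
          + (if PySem.List.pyGetD (grid[n+1]'(by omega)) ((c : Int) + 0) 0 = 1 then 1 else 0)
          + (if PySem.List.pyGetD (grid[n+1]'(by omega)) ((c : Int) + 1) 0 = 1 then 1 else 0)) := by
  unfold automata_count
  rw [show PySem.List.pyRange (-1) 2 1 = [-1, 0, 1] from by decide]
  simp only [List.foldl_cons, List.foldl_nil, ite_incr]
  rw [PySem.List.pyGetD_eq_getElem grid [] (show (0:Int) ≤ (n:Int) + -1 by omega) (by omega),
      PySem.List.pyGetD_eq_getElem grid [] (show (0:Int) ≤ (n:Int) + 0 by omega) (by omega),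
      PySem.List.pyGetD_eq_getElem grid [] (show (0:Int) ≤ (n:Int) + 1 by omega) (by omega)]
  simp only [show ((n:Int) + -1).toNat = n - 1 from by omega,
             show ((n:Int) + 0).toNat = n from by omega,
             show ((n:Int) + 1).toNat = n + 1 from by omega]
  ring

-- the B-side sum of three horizontal triple sums equals A's 3x3 count
lemma bsum_eq (grid : List (List Int)) (n c : Nat)
    (hn1 : 1 ≤ n) (hn2 : n + 1 < grid.length)
    (hc1 : 1 ≤ c) (hc2 : c + 1 < (grid.headD []).length) :
    PySem.List.pyGetD (PySem.List.pyGetD (grid.map (fun row =>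
        (PySem.List.pyRange 1 (((grid.headD []).length : Int) - 1) 1).map (fun cc =>
          (if PySem.List.pyGetD row (cc - 1) 0 = 1 then (1 : Int) else 0)
          + (if PySem.List.pyGetD row cc 0 = 1 then 1 else 0)
          + (if PySem.List.pyGetD row (cc + 1) 0 = 1 then 1 else 0)))) ((n : Int) - 1) []) ((c - 1 : Nat) : Int) 0
    + PySem.List.pyGetD (PySem.List.pyGetD (grid.map (fun row =>
        (PySem.List.pyRange 1 (((grid.headD []).length : Int) - 1) 1).map (fun cc =>
          (if PySem.List.pyGetD row (cc - 1) 0 = 1 then (1 : Int) else 0)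
          + (if PySem.List.pyGetD row cc 0 = 1 then 1 else 0)
          + (if PySem.List.pyGetD row (cc + 1) 0 = 1 then 1 else 0)))) (n : Int) []) ((c - 1 : Nat) : Int) 0
    + PySem.List.pyGetD (PySem.List.pyGetD (grid.map (fun row =>
        (PySem.List.pyRange 1 (((grid.headD []).length : Int) - 1) 1).map (fun cc =>
          (if PySem.List.pyGetD row (cc - 1) 0 = 1 then (1 : Int) else 0)
          + (if PySem.List.pyGetD row cc 0 = 1 then 1 else 0)
          + (if PySem.List.pyGetD row (cc + 1) 0 = 1 then 1 else 0)))) ((n : Int) + 1) []) ((c - 1 : Nat) : Int) 0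
    = automata_count grid (n : Int) (c : Int) := by
  rw [PySem.List.pyGetD_eq_getElem _ ([] : List Int)
        (show (0:Int) ≤ (n:Int) - 1 by omega) (by simp; omega),
      PySem.List.pyGetD_eq_getElem _ ([] : List Int)
        (show (0:Int) ≤ (n:Int) by omega) (by simp; omega),
      PySem.List.pyGetD_eq_getElem _ ([] : List Int)
        (show (0:Int) ≤ (n:Int) + 1 by omega) (by simp; omega)]
  simp only [show ((n:Int) - 1).toNat = n - 1 from by omega,
             show ((n:Int)).toNat = n from by omega,
             show ((n:Int) + 1).toNat = n + 1 from by omega,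
             List.getElem_map]
  rw [PySem.List.pyGetD_map_pyRange_one _ 1 _ (c-1) 0 (by omega),
      PySem.List.pyGetD_map_pyRange_one _ 1 _ (c-1) 0 (by omega),
      PySem.List.pyGetD_map_pyRange_one _ 1 _ (c-1) 0 (by omega)]
  rw [count_eq_triples grid n c hn1 hn2 hc1 hc2]
  rw [show (1 + ((c - 1 : Nat) : Int)) - 1 = (c : Int) + -1 from by omega,
      show (1 + ((c - 1 : Nat) : Int)) + 1 = (c : Int) + 1 from by omega,
      show (1 + ((c - 1 : Nat) : Int)) = (c : Int) + 0 from by omega]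

-- ===== VERDICT (by name: the statement is the Claim_ definition above) =====
theorem automata_iteration_spec : Claim_equal_automata_iteration := by
  intro grid mc mp _ hpre
  unfold Spec_automata_iteration
  simp only [automata_iteration_alt]
  by_cases h3 : grid.length < 3
  · rw [if_pos h3]
    unfold automata_iteration
    rw [PySem.List.pyRange_one_eq_nil (show ((grid.length : Int) - 1) ≤ 1 by omega)]
    simp
  · rw [if_neg h3]
    by_cases hc3 : (grid.headD []).length < 3
    · rw [if_pos hc3]
      unfold automata_iteration
      simp only [PySem.List.pyRange_one_eq_nil
          (show (((grid.headD []).length : Int) - 1) ≤ 1 by omega),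
        List.foldl_nil, List.foldl_fixed, List.map_id']
    · rw [if_neg hc3]
      have hall : ∀ row ∈ grid, (grid.headD []).length ≤ row.length := by
        rcases hpre with h | h | h
        · omega
        · omega
        · exact h
      rw [A_char, enum_map]
      apply List.ext_getElem
      · simp
      · intro n h1 h2
        have hnl : n < grid.length := by simpa using h1
        rw [List.getElem_mapIdx, List.getElem_mapIdx]
        dsimp only
        simp only [zero_add]
        by_cases hint : 1 ≤ n ∧ n + 1 < grid.length
        · rw [if_pos (PySem.List.mem_pyRange_one.mpr (by constructor <;> omega)),
              if_neg (show ¬((n:Int) = 0 ∨ (n:Int) = (grid.length : Int) - 1) by omega)]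
          have hrl : (grid.headD []).length ≤ (grid[n]'hnl).length :=
            hall _ (List.getElem_mem hnl)
          rw [PySem.List.slice_from _ (show (0:Int) ≤ ((grid.headD []).length : Int) - 1 by omega)]
          apply List.ext_getElem
          · simp only [List.length_mapIdx, List.length_append, List.length_cons,
              List.length_nil, List.length_map, PySem.List.length_pyRange_one, List.length_drop]
            omega
          · intro c hcl1 hcl2
            have hcl : c < (grid[n]'hnl).length := by simpa using hcl1
            rw [List.getElem_mapIdx]
            rw [List.getElem_append]
            by_cases hcmid : c < (grid.headD []).length - 1
            · rw [dif_pos (by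
                simp only [List.length_append, List.length_cons, List.length_nil,
                  List.length_map, PySem.List.length_pyRange_one]
                omega)]
              rw [List.getElem_append]
              by_cases hc0 : c = 0
              · subst hc0
                rw [dif_pos (by simp only [List.length_cons, List.length_nil]; omega)]
                rw [if_neg (fun hm => by have := PySem.List.mem_pyRange_one.mp hm; omega)]
                rw [PySem.List.pyGetD_eq_getElem (grid[n]'hnl) 0 le_rfl (by omega)]
                simp
              · rw [dif_neg (by simp only [List.length_cons, List.length_nil]; omega)]
                simp only [List.length_cons, List.length_nil, Nat.zero_add]
                rw [if_pos (PySem.List.mem_pyRange_one.mpr (by constructor <;> omega))]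
                rw [List.getElem_map, PySem.List.getElem_pyRange_one]
                simp only [zero_add]
                rw [bsum_eq grid n c hint.1 hint.2 (by omega) (by omega)]
                simp only [valA]
            · rw [dif_neg (by
                simp only [List.length_append, List.length_cons, List.length_nil,
                  List.length_map, PySem.List.length_pyRange_one]
                omega)]
              rw [if_neg (fun hm => by have := PySem.List.mem_pyRange_one.mp hm; omega)]
              simp only [List.length_append, List.length_cons, List.length_nil,
                List.length_map, PySem.List.length_pyRange_one]
              rw [List.getElem_drop]
              congr 1
              omega
        · rw [if_neg (fun hm => by have := PySem.List.mem_pyRange_one.mp hm; omega),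
              if_pos (show (n:Int) = 0 ∨ (n:Int) = (grid.length : Int) - 1 by omega)]
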